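-- pv_equiv track=rewrite | github.com/karry-233/First | Game_BinarySearch.py | find_the_word
-- ===== SOURCE A (Python) =====
-- def word_to_key(word):
--     return ''.join(sorted(word.lower()))
--
-- def find_the_word(alist, item):
--     alist = sorted(alist)
--     first = 0
--     last = len(alist)-1
--     found = False
--
--     while first<=last and not found:
--         midpoint = (first + last)//2
--         if alist[midpoint] == word_to_key(item):
--             found = True
--         else:
--             if word_to_key(item) < alist[midpoint]:
--                 last = midpoint-1
--             else:
--                 first = midpoint+1
--
--     return found
-- ===== SOURCE B (Python) =====
-- def word_to_key(word):
--     return ''.join(sorted(word.lower()))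
--
-- def find_the_word(alist, item):
--     # linear membership test: a sorted list contains the key iff the original does
--     return word_to_key(item) in alist
-- ===== Notes on version B (the rewrite author's own statement) =====
-- stated objective: simpler
-- what changed: B replaces the sort + iterative binary search with a direct linear membership test: a sorted permutation of alist contains word_to_key(item) iff alist itself does, so no sorting or index arithmetic is needed.
import Mathlib
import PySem

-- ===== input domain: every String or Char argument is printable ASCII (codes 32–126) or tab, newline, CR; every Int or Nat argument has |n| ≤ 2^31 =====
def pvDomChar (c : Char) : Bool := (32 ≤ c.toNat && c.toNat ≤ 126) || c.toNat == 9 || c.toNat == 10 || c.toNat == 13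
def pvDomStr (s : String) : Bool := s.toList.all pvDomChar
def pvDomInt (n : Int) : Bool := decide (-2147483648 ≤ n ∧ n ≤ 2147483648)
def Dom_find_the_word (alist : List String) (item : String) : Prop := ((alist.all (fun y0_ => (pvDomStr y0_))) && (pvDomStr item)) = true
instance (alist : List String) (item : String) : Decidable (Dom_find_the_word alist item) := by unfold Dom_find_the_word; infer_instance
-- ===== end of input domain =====

-- ===== PORT A =====
-- B replaces the sort + iterative binary search with a plain membership test; objective: simpler.
-- word_to_key(word) = ''.join(sorted(word.lower())) : the word's lowercased letters in sorted order.
def pvWordToKey (word : String) : String :=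
  String.ofList (PySem.List.sorted (PySem.Str.lower word).toList (fun c => c) false)

-- the while loop of A: state (first, last); found becomes the return value.
-- The Nat argument is fuel making the recursion structural; the caller passes enough
-- (the interval shrinks each step), so the 0-fuel branch is never taken.
def pvASearch (ys : List String) (key : String) : Nat → Int → Int → Bool
  | 0, _, _ => false
  | fuel + 1, first, last =>
    if first ≤ last then
      let midpoint := PySem.Int.floordiv (first + last) 2
      match PySem.List.pyGet? ys midpoint with
      | none => false   -- IndexError: unreachable for 0 ≤ first, last ≤ len-1 (the only calls made)
      | some v =>
        if v = key then true
        else if key < v then pvASearch ys key fuel first (midpoint - 1)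
        else pvASearch ys key fuel (midpoint + 1) last
    else false

def find_the_word (alist : List String) (item : String) : Bool :=
  let sortedList := PySem.List.sorted alist (fun x => x) false
  pvASearch sortedList (pvWordToKey item) (sortedList.length + 1) 0 ((sortedList.length : Int) - 1)

-- ===== PORT B =====
def find_the_word_alt (alist : List String) (item : String) : Bool :=
  alist.contains (pvWordToKey item)

-- ===== PRECONDITION & SPEC =====
def Spec_find_the_word (alist : List String) (item : String) (out : Bool) : Prop := out = find_the_word_alt alist item
instance (alist : List String) (item : String) (out : Bool) : Decidable (Spec_find_the_word alist item out) := by unfold Spec_find_the_word; infer_instance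

-- ===== CLAIM (what is proved, stated in full; the proofs are below) =====
def Claim_equal_find_the_word : Prop := ∀ (alist : List String) (item : String), Dom_find_the_word alist item → Spec_find_the_word alist item (find_the_word alist item)

-- ===== LEMMAS AND PROOFS =====

-- pyGet? on an in-range nonnegative index
theorem pvGetSome {α : Type} (xs : List α) (i : Int) (h0 : 0 ≤ i) (h1 : i < (xs.length : Int)) :
    PySem.List.pyGet? xs i = some (xs[i.toNat]'(by omega)) := by
  simp only [PySem.List.pyGet?, PySem.List.pyIdx?, if_pos h0, if_pos h1]
  exact List.getElem?_eq_getElem (show i.toNat < xs.length by omega)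

-- Binary-search characterisation: on a ≤-sorted list, A's loop over [first, last]
-- (run with enough fuel) returns true iff the key occurs at some index of that range.
theorem pvASearch_iff (ys : List String) (key : String)
    (hsorted : ys.Pairwise (fun a b => a ≤ b)) :
    ∀ (fuel : Nat) (first last : Int), 0 ≤ first → last ≤ (ys.length : Int) - 1 →
    (last - first + 1).toNat ≤ fuel →
    (pvASearch ys key fuel first last = true ↔
      ∃ i : Nat, first ≤ (i : Int) ∧ (i : Int) ≤ last ∧ ∃ hi : i < ys.length, ys[i] = key) := by
  intro fuel
  induction fuel with
  | zero =>
    intro first last h0 hlast hfuel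
    rw [pvASearch]
    simp only [Bool.false_eq_true, false_iff]
    rintro ⟨i, hi1, hi2, -, -⟩
    omega
  | succ fuel ih =>
    intro first last h0 hlast hfuel
    rw [pvASearch]
    by_cases h : first ≤ last
    · rw [if_pos h]
      have hb := PySem.Int.floordiv_two_mid_bounds h
      have hmlt : (PySem.Int.floordiv (first + last) 2).toNat < ys.length := by omega
      have hv' : PySem.List.pyGet? ys (PySem.Int.floordiv (first + last) 2) =
          some (ys[(PySem.Int.floordiv (first + last) 2).toNat]'hmlt) :=
        pvGetSome ys _ (by omega) (by omega)
      simp only [hv']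
      by_cases heq : ys[(PySem.Int.floordiv (first + last) 2).toNat]'hmlt = key
      · rw [if_pos heq]
        exact iff_of_true rfl
          ⟨(PySem.Int.floordiv (first + last) 2).toNat, by omega, by omega, hmlt, heq⟩
      · rw [if_neg heq]
        by_cases hlt : key < ys[(PySem.Int.floordiv (first + last) 2).toNat]'hmlt
        · rw [if_pos hlt]
          rw [ih first (PySem.Int.floordiv (first + last) 2 - 1) h0 (by omega) (by omega)]
          constructor
          · rintro ⟨i, hi1, hi2, hi3, hi4⟩
            exact ⟨i, hi1, by omega, hi3, hi4⟩
          · rintro ⟨i, hi1, hi2, hi3, hi4⟩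
            refine ⟨i, hi1, ?_, hi3, hi4⟩
            -- key < ys[mid]: a hit cannot lie at or beyond mid
            by_contra hcon
            have hle : ys[(PySem.Int.floordiv (first + last) 2).toNat]'hmlt ≤ ys[i] := by
              rcases Nat.lt_or_ge (PySem.Int.floordiv (first + last) 2).toNat i with hlt' | hge'
              · exact List.pairwise_iff_getElem.mp hsorted _ _ hmlt hi3 hlt'
              · have hEq : (PySem.Int.floordiv (first + last) 2).toNat = i := by omega
                simp only [hEq]
                exact le_rfl
            rw [hi4] at hle
            exact absurd (lt_of_lt_of_le hlt hle) (lt_irrefl _)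
        · rw [if_neg hlt]
          have hvk : ys[(PySem.Int.floordiv (first + last) 2).toNat]'hmlt < key := by
            rcases lt_trichotomy key (ys[(PySem.Int.floordiv (first + last) 2).toNat]'hmlt)
              with hc | hc | hc
            · exact absurd hc hlt
            · exact absurd hc.symm heq
            · exact hc
          rw [ih (PySem.Int.floordiv (first + last) 2 + 1) last (by omega) hlast (by omega)]
          constructor
          · rintro ⟨i, hi1, hi2, hi3, hi4⟩
            exact ⟨i, by omega, hi2, hi3, hi4⟩
          · rintro ⟨i, hi1, hi2, hi3, hi4⟩
            refine ⟨i, ?_, hi2, hi3, hi4⟩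
            -- ys[mid] < key: a hit cannot lie at or before mid
            by_contra hcon
            have hle : ys[i] ≤ ys[(PySem.Int.floordiv (first + last) 2).toNat]'hmlt := by
              rcases Nat.lt_or_ge i (PySem.Int.floordiv (first + last) 2).toNat with hlt' | hge'
              · exact List.pairwise_iff_getElem.mp hsorted _ _ hi3 hmlt hlt'
              · have hEq : i = (PySem.Int.floordiv (first + last) 2).toNat := by omega
                simp only [hEq]
                exact le_rfl
            rw [hi4] at hle
            exact absurd (lt_of_lt_of_le hvk hle) (lt_irrefl _)
    · rw [if_neg h]
      simp only [Bool.false_eq_true, false_iff]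
      rintro ⟨i, hi1, hi2, -, -⟩
      omega

-- ===== VERDICT (by name: the statement is the Claim_ definition above) =====
theorem find_the_word_spec : Claim_equal_find_the_word := by
  intro alist item _
  unfold Spec_find_the_word find_the_word find_the_word_alt
  set ys := PySem.List.sorted alist (fun x => x) false with hys
  set key := pvWordToKey item with hkey
  have hsorted : ys.Pairwise (fun a b => a ≤ b) := PySem.List.sorted_pairwise alist (fun x => x)
  have hiff := pvASearch_iff ys key hsorted (ys.length + 1) 0 ((ys.length : Int) - 1)
    le_rfl le_rfl (by omega)
  have hmem : key ∈ alist ↔ ∃ i : Nat, (0:Int) ≤ (i : Int) ∧ (i : Int) ≤ (ys.length : Int) - 1 ∧ ∃ hi : i < ys.length, ys[i] = key := by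
    rw [← PySem.List.mem_sorted alist (fun x => x) false key, ← hys]
    constructor
    · intro hk
      obtain ⟨i, hi, hval⟩ := List.getElem_of_mem hk
      exact ⟨i, by omega, by omega, hi, hval⟩
    · rintro ⟨i, -, -, hi, hval⟩
      exact hval ▸ List.getElem_mem hi
  by_cases hk : key ∈ alist
  · rw [hiff.mpr (hmem.mp hk)]
    simp [hk]
  · have hfalse : pvASearch ys key (ys.length + 1) 0 ((ys.length : Int) - 1) = false := by
      rcases Bool.eq_false_or_eq_true (pvASearch ys key (ys.length + 1) 0 ((ys.length : Int) - 1)) with ht | hf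
      · exact absurd (hmem.mpr (hiff.mp ht)) hk
      · exact hf
    rw [hfalse]
    simp [hk]
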